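-- pv_equiv track=rewrite | github.com/mjogodnik22/Seating-Configuration | polyomino.py | filterPolys
-- ===== SOURCE A (Python) =====
-- def filterPolys(polyominoes):
--     suitablePolys = []
--     for polyomino in polyominoes:
--         if len(polyomino) == 1:
--             return polyominoes
--         polyGood = True
--         polyDict = {}
--         for seat in polyomino:
--             x = seat[0]
--             y = seat[1]
--             if y not in polyDict.keys():
--                 polyDict[y] = []
--             polyDict[y].append(x)
--         for entry in polyDict.keys():
--             if not(goodPoly(polyDict[entry])):
--                 polyGood = False
--                 break
--             polyGood = True
--         if polyGood:
--             suitablePolys.append(polyomino)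
--     return suitablePolys
--
-- def goodPoly(listOfX):
--     listOfX.sort()
--     if len(listOfX) == 0:
--         return False
--     prev = listOfX[0]
--     for i in range(len(listOfX)):
--         if i == 0:
--             continue
--         cur = listOfX[i]
--         if (cur - prev) == 1:
--             return True
--         prev = cur
--     return False
-- ===== SOURCE B (Python) =====
-- def filterPolys(polyominoes):
--     result = []
--     for polyomino in polyominoes:
--         if len(polyomino) == 1:
--             return polyominoes
--         seats = set()
--         for s in polyomino:
--             seats.add((s[0], s[1]))
--         allRows = set()
--         goodRows = set()
--         for s in polyomino:
--             x, y = s[0], s[1]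
--             allRows.add(y)
--             if (x + 1, y) in seats:
--                 goodRows.add(y)
--         if goodRows == allRows:
--             result.append(polyomino)
--     return result
-- ===== Notes on version B (the rewrite author's own statement) =====
-- stated objective: simpler
-- what changed: A groups each polyomino's x-coordinates into a per-row dict, then sorts every row and scans for an adjacent difference of 1; B instead builds one set of (x,y) seats and compares the set of all row-ys with the set of row-ys having some (x+1,y) seat, with no dict, no sorting and no index scan.
import Mathlib
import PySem

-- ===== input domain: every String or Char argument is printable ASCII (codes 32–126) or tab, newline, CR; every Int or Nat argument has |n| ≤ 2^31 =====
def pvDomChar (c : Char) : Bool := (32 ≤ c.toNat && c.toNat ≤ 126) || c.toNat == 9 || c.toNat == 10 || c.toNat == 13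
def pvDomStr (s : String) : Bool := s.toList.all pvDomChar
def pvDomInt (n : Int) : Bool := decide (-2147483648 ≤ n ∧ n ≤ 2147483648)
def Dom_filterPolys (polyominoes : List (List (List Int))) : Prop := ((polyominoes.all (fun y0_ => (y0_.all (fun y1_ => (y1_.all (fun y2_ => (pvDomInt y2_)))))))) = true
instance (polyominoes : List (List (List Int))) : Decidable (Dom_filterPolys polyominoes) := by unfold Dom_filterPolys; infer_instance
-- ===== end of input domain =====

-- B replaces A's per-row dict grouping + sort-and-scan with two set passes (seat set, then
-- row sets compared); objective: simpler. Equivalence of the RETURN value is what is proved.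


-- ===== PORT A =====
-- the i-loop of goodPoly from i upward (Python skips i == 0 by starting prev = listOfX[0])
def pvGoodPolyLoop (M : List Int) (prev : Int) (i : Nat) : Bool :=
  if h : i < M.length then
    let cur := M[i]
    if cur - prev == 1 then true
    else pvGoodPolyLoop M cur (i + 1)
  else false
termination_by M.length - i

def goodPolyA (listOfX : List Int) : Bool :=
  let M := PySem.List.sorted listOfX (fun x => x) false
  if M.length == 0 then false
  else pvGoodPolyLoop M (PySem.List.pyGetD M 0 0) 1

-- 'if y not in polyDict: polyDict[y] = []' followed by 'polyDict[y].append(x)' is the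
-- grouping idiom d[y] = d.get(y, []) + [x], i.e. Dict.modify
def pvBuildDict (polyomino : List (List Int)) : PySem.Dict Int (List Int) :=
  polyomino.foldl (fun d seat =>
    let x := PySem.List.pyGetD seat 0 0
    let y := PySem.List.pyGetD seat 1 0
    d.modify y [] (fun l => l ++ [x])) PySem.Dict.empty

-- 'for entry in polyDict.keys(): if not goodPoly(...): polyGood = False; break'
def pvCheckKeys (d : PySem.Dict Int (List Int)) : List Int → Bool
  | [] => true
  | k :: rest => if !(goodPolyA (d.getD k [])) then false else pvCheckKeys d rest

def pvFilterGo (orig : List (List (List Int))) (rest acc : List (List (List Int))) :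
    List (List (List Int)) :=
  match rest with
  | [] => acc
  | polyomino :: rest =>
    if polyomino.length == 1 then orig
    else
      if pvCheckKeys (pvBuildDict polyomino) (pvBuildDict polyomino).keys then
        pvFilterGo orig rest (acc ++ [polyomino])
      else pvFilterGo orig rest acc

def filterPolys (polyominoes : List (List (List Int))) : List (List (List Int)) :=
  pvFilterGo polyominoes polyominoes []

-- ===== PORT B =====
def pvKeepAlt (polyomino : List (List Int)) : Bool :=
  let seats : PySem.Set (Int × Int) :=
    polyomino.foldl (fun s seat =>
      PySem.Set.add s (PySem.List.pyGetD seat 0 0, PySem.List.pyGetD seat 1 0))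
      PySem.Set.empty
  let rows :=
    polyomino.foldl (fun (rs : PySem.Set Int × PySem.Set Int) seat =>
      let x := PySem.List.pyGetD seat 0 0
      let y := PySem.List.pyGetD seat 1 0
      (PySem.Set.add rs.1 y,
       if PySem.Set.contains seats (x + 1, y) then PySem.Set.add rs.2 y else rs.2))
      (PySem.Set.empty, PySem.Set.empty)
  PySem.Set.equal rows.2 rows.1

def pvAltGo (orig : List (List (List Int))) (rest acc : List (List (List Int))) :
    List (List (List Int)) :=
  match rest with
  | [] => acc
  | polyomino :: rest =>
    if polyomino.length == 1 then orig
    else if pvKeepAlt polyomino then pvAltGo orig rest (acc ++ [polyomino])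
    else pvAltGo orig rest acc

def filterPolys_alt (polyominoes : List (List (List Int))) : List (List (List Int)) :=
  pvAltGo polyominoes polyominoes []

-- ===== PRECONDITION & SPEC =====
-- Pre_ excludes exactly the inputs where Python A raises IndexError: a seat with fewer than
-- two coordinates (seat[0] / seat[1]) in a polyomino that A actually inspects, i.e. one before
-- the first single-seat polyomino (there A returns the whole list without reading any seat).
def Pre_filterPolys (polyominoes : List (List (List Int))) : Prop :=
  ∀ p ∈ polyominoes.takeWhile (fun q => q.length != 1), ∀ s ∈ p, 2 ≤ s.length
instance (polyominoes : List (List (List Int))) : Decidable (Pre_filterPolys polyominoes) := by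
  unfold Pre_filterPolys; infer_instance

def pvWitness_filterPolys : List (List (List Int)) := [[[0, 0], [1, 0]], [[0, 1], [2, 1]]]

def Spec_filterPolys (polyominoes : List (List (List Int))) (out : List (List (List Int))) : Prop := out = filterPolys_alt polyominoes
instance (polyominoes : List (List (List Int))) (out : List (List (List Int))) : Decidable (Spec_filterPolys polyominoes out) := by unfold Spec_filterPolys; infer_instance

-- ===== CLAIM (what is proved, stated in full; the proofs are below) =====
def Claim_equal_filterPolys : Prop := ∀ (polyominoes : List (List (List Int))), Dom_filterPolys polyominoes → Pre_filterPolys polyominoes → Spec_filterPolys polyominoes (filterPolys polyominoes)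

-- ===== LEMMAS AND PROOFS =====
def pvAdj : Int → List Int → Bool
  | _, [] => false
  | prev, c :: t => if c - prev == 1 then true else pvAdj c t

theorem pvGoodPolyLoop_eq_adj (M : List Int) (prev : Int) (i : Nat) :
    pvGoodPolyLoop M prev i = pvAdj prev (M.drop i) := by
  induction prev, i using pvGoodPolyLoop.induct (M := M) with
  | case1 prev i h cur hone =>
      have h1 : M[i] - prev = 1 := by simpa using hone
      rw [pvGoodPolyLoop, List.drop_eq_getElem_cons h]
      simp [pvAdj, h1, h]
  | case2 prev i h cur hone ih =>
      rw [pvGoodPolyLoop, List.drop_eq_getElem_cons h]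
      simp only [pvAdj, dif_pos h]
      rw [ih]
  | case3 prev i h =>
      rw [pvGoodPolyLoop]
      simp [pvAdj, h, List.drop_eq_nil_of_le (Nat.le_of_not_lt h)]

theorem pvAdj_iff (prev : Int) (M : List Int) (h : (prev :: M).Pairwise (· ≤ ·)) :
    pvAdj prev M = true ↔ ∃ x, x ∈ prev :: M ∧ x + 1 ∈ prev :: M := by
  induction M generalizing prev with
  | nil => simp [pvAdj]
  | cons c t ih =>
      rcases List.pairwise_cons.mp h with ⟨hle, htail⟩
      have hpc : prev ≤ c := hle c (by simp)
      have hct : ∀ z ∈ c :: t, c ≤ z := by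
        intro z hz
        rcases List.mem_cons.mp hz with rfl | hz
        · exact le_refl _
        · exact (List.pairwise_cons.mp htail).1 z hz
      rw [pvAdj]
      by_cases hone : c - prev = 1
      · have hb : (c - prev == 1) = true := by simpa using hone
        simp only [hb, if_true]
        constructor
        · intro _
          exact ⟨prev, by simp, by simp [show prev + 1 = c by omega]⟩
        · intro _; trivial
      · have hb : (c - prev == 1) = false := by simpa using hone
        simp only [hb, Bool.false_eq_true, if_false]
        rw [ih c htail]
        constructor
        · rintro ⟨x, hx, hx1⟩
          exact ⟨x, List.mem_cons_of_mem _ hx, List.mem_cons_of_mem _ hx1⟩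
        · rintro ⟨x, hx, hx1⟩
          rcases List.mem_cons.mp hx with rfl | hx
          · -- x = prev
            have hx1' : x + 1 ∈ c :: t := by
              rcases List.mem_cons.mp hx1 with he | hx1
              · omega
              · exact hx1
            have hcx : c ≤ x + 1 := hct _ hx1'
            have hcx' : c = x := by omega
            exact ⟨x, by simp [hcx'], hx1'⟩
          · -- x ∈ c :: t
            have hx1' : x + 1 ∈ c :: t := by
              rcases List.mem_cons.mp hx1 with he | hx1
              · have := hle x hx; omega
              · exact hx1
            exact ⟨x, hx, hx1'⟩


theorem goodPolyA_iff (L : List Int) :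
    goodPolyA L = true ↔ (L ≠ [] ∧ ∃ x, x ∈ L ∧ x + 1 ∈ L) := by
  unfold goodPolyA
  rcases hM : PySem.List.sorted L (fun x => x) false with _ | ⟨m, t⟩
  · have hL : L = [] := (PySem.List.sorted_eq_nil_iff _ _ _).mp hM
    simp [hL]
  · have hL : L ≠ [] := by
      intro h; rw [h] at hM; simp [PySem.List.sorted] at hM
    have hpw : (m :: t).Pairwise (· ≤ ·) := by
      have := PySem.List.sorted_pairwise (xs := L) (key := fun x => x)
      rw [hM] at this; simpa using this
    have hmem : ∀ x : Int, x ∈ m :: t ↔ x ∈ L := by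
      intro x
      rw [← hM]; exact PySem.List.mem_sorted _ _ _ _
    simp only [List.length_cons, PySem.List.pyGetD_zero_cons]
    rw [show ((t.length + 1 : Nat) == 0) = false by simp]
    simp only [Bool.false_eq_true, if_false]
    rw [pvGoodPolyLoop_eq_adj, show (m :: t).drop 1 = t from rfl]
    rw [pvAdj_iff m t hpw]
    constructor
    · rintro ⟨x, hx, hx1⟩
      exact ⟨hL, x, (hmem x).mp hx, (hmem (x+1)).mp hx1⟩
    · rintro ⟨-, x, hx, hx1⟩
      exact ⟨x, (hmem x).mpr hx, (hmem (x+1)).mpr hx1⟩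



def pvSX (s : List Int) : Int := PySem.List.pyGetD s 0 0
def pvSY (s : List Int) : Int := PySem.List.pyGetD s 1 0

theorem pvCheckKeys_eq_all (d : PySem.Dict Int (List Int)) (ks : List Int) :
    pvCheckKeys d ks = ks.all (fun k => goodPolyA (d.getD k [])) := by
  induction ks with
  | nil => rfl
  | cons k rest ih =>
      rw [pvCheckKeys, ih]
      by_cases h : goodPolyA (d.getD k []) <;> simp [h]

theorem pvBuild_eq (p : List (List Int)) :
    pvBuildDict p = (p.map (fun s => (pvSY s, pvSX s))).foldl
      (fun d q => d.modify q.1 [] (fun l => l ++ [q.2])) PySem.Dict.empty := by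
  rw [List.foldl_map]; rfl

theorem pvBuild_getD (p : List (List Int)) (y : Int) :
    (pvBuildDict p).getD y [] =
      ((p.map (fun s => (pvSY s, pvSX s))).filter (fun q => q.1 == y)).map (·.2) := by
  rw [pvBuild_eq, PySem.Dict.getD_foldl_modify_append]
  simp

theorem pvBuild_keys (p : List (List Int)) :
    (pvBuildDict p).keys = PySem.Set.ofList (p.map pvSY) := by
  rw [pvBuild_eq, PySem.Dict.keys_foldl_modify_key (key := Prod.fst)]
  rw [PySem.Set.ofList_eq_foldl]
  simp only [PySem.Set.update, List.map_map]
  rfl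


def pvPairs (p : List (List Int)) : List (Int × Int) := p.map (fun s => (pvSX s, pvSY s))

theorem pvFoldAdd_eq {β : Type} (q : List β) (k : β → Int × Int) :
    q.foldl (fun r s => PySem.Set.add r (k s)) PySem.Set.empty = PySem.Set.ofList (q.map k) := by
  rw [PySem.Set.ofList_eq_foldl, List.foldl_map]; rfl

theorem pvFoldAddI_eq {β : Type} (q : List β) (k : β → Int) :
    q.foldl (fun r s => PySem.Set.add r (k s)) PySem.Set.empty = PySem.Set.ofList (q.map k) := by
  rw [PySem.Set.ofList_eq_foldl, List.foldl_map]; rfl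

theorem pvKeepAlt_iff (p : List (List Int)) :
    pvKeepAlt p = true ↔
      ∀ y ∈ p.map pvSY, ∃ s ∈ p, pvSY s = y ∧ (pvSX s + 1, pvSY s) ∈ pvPairs p := by
  simp only [pvKeepAlt, pvSX, pvSY, pvPairs]
  have hseats : p.foldl (fun s seat =>
      PySem.Set.add s (PySem.List.pyGetD seat 0 0, PySem.List.pyGetD seat 1 0))
      PySem.Set.empty
      = PySem.Set.ofList (p.map (fun s => (PySem.List.pyGetD s 0 0, PySem.List.pyGetD s 1 0))) :=
    pvFoldAdd_eq p _
  rw [hseats]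
  rw [PySem.List.foldl_prod_mk
      (f := fun r seat => PySem.Set.add r (PySem.List.pyGetD seat 1 0))
      (g := fun r seat => if PySem.Set.contains
          (PySem.Set.ofList (p.map (fun s => (PySem.List.pyGetD s 0 0, PySem.List.pyGetD s 1 0))))
          (PySem.List.pyGetD seat 0 0 + 1, PySem.List.pyGetD seat 1 0)
        then PySem.Set.add r (PySem.List.pyGetD seat 1 0) else r)]
  have hall : p.foldl (fun r seat => PySem.Set.add r (PySem.List.pyGetD seat 1 0))
      PySem.Set.empty = PySem.Set.ofList (p.map (fun s => PySem.List.pyGetD s 1 0)) :=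
    pvFoldAddI_eq p _
  have hgood : p.foldl (fun r seat => if PySem.Set.contains
          (PySem.Set.ofList (p.map (fun s => (PySem.List.pyGetD s 0 0, PySem.List.pyGetD s 1 0))))
          (PySem.List.pyGetD seat 0 0 + 1, PySem.List.pyGetD seat 1 0)
        then PySem.Set.add r (PySem.List.pyGetD seat 1 0) else r) PySem.Set.empty
      = PySem.Set.ofList ((p.filter (fun seat => PySem.Set.contains
          (PySem.Set.ofList (p.map (fun s => (PySem.List.pyGetD s 0 0, PySem.List.pyGetD s 1 0))))
          (PySem.List.pyGetD seat 0 0 + 1, PySem.List.pyGetD seat 1 0))).map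
          (fun s => PySem.List.pyGetD s 1 0)) := by
    rw [PySem.List.foldl_if_eq_foldl_filter]
    exact pvFoldAddI_eq _ _
  rw [hall, hgood, PySem.Set.equal_iff]
  simp only [PySem.Set.mem_ofList, List.mem_map, List.mem_filter,
    PySem.Set.contains_iff, PySem.Set.mem_ofList]
  constructor
  · intro h y hy
    rcases hy with ⟨s, hs, rfl⟩
    rcases (h (PySem.List.pyGetD s 1 0)).mpr ⟨s, hs, rfl⟩ with ⟨s', ⟨hs', hc⟩, hy'⟩
    refine ⟨s', hs', hy', ?_⟩
    rw [hy']
    rcases hc with ⟨u, hu, he⟩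
    exact ⟨u, hu, by rw [he, hy']⟩
  · intro h y
    constructor
    · rintro ⟨s, ⟨hs, hc⟩, rfl⟩
      exact ⟨s, hs, rfl⟩
    · rintro ⟨s, hs, rfl⟩
      rcases h (PySem.List.pyGetD s 1 0) ⟨s, hs, rfl⟩ with ⟨s', hs', hy', hmem⟩
      refine ⟨s', ⟨hs', ?_⟩, hy'⟩
      rcases hmem with ⟨u, hu, he⟩
      exact ⟨u, hu, he⟩

theorem pvRow_mem (p : List (List Int)) (y x : Int) :
    x ∈ (pvBuildDict p).getD y [] ↔ (y, x) ∈ p.map (fun s => (pvSY s, pvSX s)) := by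
  rw [pvBuild_getD]
  simp only [List.mem_map, List.mem_filter]
  constructor
  · rintro ⟨q, ⟨hq, hqy⟩, rfl⟩
    have h1 : q.1 = y := by simpa using hqy
    rcases q with ⟨a, b⟩
    cases h1
    exact hq
  · intro hm
    exact ⟨(y, x), ⟨hm, by simp⟩, rfl⟩

theorem pvKeepA_iff (p : List (List Int)) :
    pvCheckKeys (pvBuildDict p) (pvBuildDict p).keys = true ↔
      ∀ y ∈ p.map pvSY, ∃ x, (y, x) ∈ p.map (fun s => (pvSY s, pvSX s)) ∧
        (y, x + 1) ∈ p.map (fun s => (pvSY s, pvSX s)) := by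
  rw [pvCheckKeys_eq_all, List.all_eq_true]
  simp only [pvBuild_keys, PySem.Set.mem_ofList]
  constructor
  · intro h y hy
    rcases (goodPolyA_iff _).mp (h y hy) with ⟨-, x, hx, hx1⟩
    exact ⟨x, (pvRow_mem p y x).mp hx, (pvRow_mem p y _).mp hx1⟩
  · intro h y hy
    rcases h y hy with ⟨x, h1, h2⟩
    have hx := (pvRow_mem p y x).mpr h1
    exact (goodPolyA_iff _).mpr ⟨List.ne_nil_of_mem hx, x, hx, (pvRow_mem p y _).mpr h2⟩

theorem pvKeep_eq (p : List (List Int)) :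
    pvCheckKeys (pvBuildDict p) (pvBuildDict p).keys = pvKeepAlt p := by
  rw [Bool.eq_iff_iff, pvKeepA_iff, pvKeepAlt_iff]
  refine forall_congr' (fun y => forall_congr' (fun hy => ?_))
  simp only [List.mem_map, pvPairs]
  constructor
  · rintro ⟨x, ⟨s, hs, he⟩, ⟨s', hs', he'⟩⟩
    have h1 : pvSY s = y ∧ pvSX s = x := by
      constructor <;> [exact congrArg Prod.fst he; exact congrArg Prod.snd he]
    have h2 : pvSY s' = y ∧ pvSX s' = x + 1 := by
      constructor <;> [exact congrArg Prod.fst he'; exact congrArg Prod.snd he']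
    exact ⟨s, hs, h1.1, ⟨s', hs', by rw [h2.2, h1.2, h2.1, h1.1]⟩⟩
  · rintro ⟨s, hs, hy', ⟨s', hs', he⟩⟩
    have h2 : pvSX s' = pvSX s + 1 ∧ pvSY s' = pvSY s := by
      constructor <;> [exact congrArg Prod.fst he; exact congrArg Prod.snd he]
    refine ⟨pvSX s, ⟨s, hs, by rw [hy']⟩, ⟨s', hs', ?_⟩⟩
    rw [h2.1, h2.2, hy']

theorem pvGo_eq (orig rest acc : List (List (List Int))) :
    pvFilterGo orig rest acc = pvAltGo orig rest acc := by
  induction rest generalizing acc with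
  | nil => rfl
  | cons p rest ih =>
      rw [pvFilterGo, pvAltGo, pvKeep_eq]
      by_cases h : p.length == 1
      · simp [h]
      · by_cases hk : pvKeepAlt p <;> simp [h, hk, ih]

-- ===== VERDICT (by name: the statement is the Claim_ definition above) =====
theorem filterPolys_spec : Claim_equal_filterPolys := by
  intro polys _ _
  unfold Spec_filterPolys filterPolys filterPolys_alt
  exact pvGo_eq polys polys []
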